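-- pv_equiv track=rewrite | github.com/siegert-lab/preprocess_images | src/utils.py | generate_mesh_coordinates
-- ===== SOURCE A (Python) =====
-- def generate_mesh_coordinates(num_squares_x, num_squares_y, square_size, x0=0, y0=0):
--     # Generate the grid of coordinates
--     coordinates = []
--     for i in range(num_squares_y):
--         for j in range(num_squares_x):
--             x = x0 + j * square_size
--             y = y0 + i * square_size
--             coordinates.append((x, y))
--
--     return coordinates
-- ===== SOURCE B (Python) =====
-- def generate_mesh_coordinates(num_squares_x, num_squares_y, square_size, x0=0, y0=0):
--     # Empty grid when either dimension is non-positive.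
--     if num_squares_x <= 0 or num_squares_y <= 0:
--         return []
--     # One flat pass: recover (row, col) from the flat index by divmod.
--     return [(x0 + (k % num_squares_x) * square_size,
--              y0 + (k // num_squares_x) * square_size)
--             for k in range(num_squares_x * num_squares_y)]
-- ===== Notes on version B (the rewrite author's own statement) =====
-- stated objective: alternative
-- what changed: Replaces the nested row/column loops with a single flat pass over range(nx*ny), recovering each row and column from the flat index by divmod arithmetic.
import Mathlib
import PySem

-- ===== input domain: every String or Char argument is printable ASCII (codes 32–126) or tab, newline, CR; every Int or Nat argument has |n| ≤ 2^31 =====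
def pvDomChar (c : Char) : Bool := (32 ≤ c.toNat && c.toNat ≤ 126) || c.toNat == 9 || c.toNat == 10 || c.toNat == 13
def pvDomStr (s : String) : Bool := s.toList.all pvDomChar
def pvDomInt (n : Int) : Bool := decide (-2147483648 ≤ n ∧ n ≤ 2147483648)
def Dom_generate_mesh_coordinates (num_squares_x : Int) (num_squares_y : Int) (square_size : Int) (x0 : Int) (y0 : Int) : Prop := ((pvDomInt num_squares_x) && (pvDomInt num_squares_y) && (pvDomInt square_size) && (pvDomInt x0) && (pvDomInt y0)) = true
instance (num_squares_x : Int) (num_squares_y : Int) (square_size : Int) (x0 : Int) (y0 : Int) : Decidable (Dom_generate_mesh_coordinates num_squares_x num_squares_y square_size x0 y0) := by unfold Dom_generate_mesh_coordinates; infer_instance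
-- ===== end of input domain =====

-- B replaces A's nested row/column loops with one flat pass over range(nx*ny) recovering (row, col) by divmod (objective: alternative, same cost).


-- ===== PORT A =====
def generate_mesh_coordinates (num_squares_x : Int) (num_squares_y : Int) (square_size : Int) (x0 : Int) (y0 : Int) : List (Int × Int) :=
  (PySem.List.pyRange 0 num_squares_y 1).foldl (fun coordinates i =>
    (PySem.List.pyRange 0 num_squares_x 1).foldl (fun coordinates j =>
      coordinates ++ [(x0 + j * square_size, y0 + i * square_size)]) coordinates) []

-- ===== PORT B =====
def generate_mesh_coordinates_alt (num_squares_x : Int) (num_squares_y : Int) (square_size : Int) (x0 : Int) (y0 : Int) : List (Int × Int) :=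
  if num_squares_x ≤ 0 ∨ num_squares_y ≤ 0 then []
  else (PySem.List.pyRange 0 (num_squares_x * num_squares_y) 1).map (fun k =>
    (x0 + PySem.Int.mod k num_squares_x * square_size,
     y0 + PySem.Int.floordiv k num_squares_x * square_size))

-- ===== PRECONDITION & SPEC =====
def Spec_generate_mesh_coordinates (num_squares_x : Int) (num_squares_y : Int) (square_size : Int) (x0 : Int) (y0 : Int) (out : List (Int × Int)) : Prop := out = generate_mesh_coordinates_alt num_squares_x num_squares_y square_size x0 y0
instance (num_squares_x : Int) (num_squares_y : Int) (square_size : Int) (x0 : Int) (y0 : Int) (out : List (Int × Int)) : Decidable (Spec_generate_mesh_coordinates num_squares_x num_squares_y square_size x0 y0 out) := by unfold Spec_generate_mesh_coordinates; infer_instance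

-- ===== CLAIM (what is proved, stated in full; the proofs are below) =====
def Claim_equal_generate_mesh_coordinates : Prop := ∀ (num_squares_x : Int) (num_squares_y : Int) (square_size : Int) (x0 : Int) (y0 : Int), Dom_generate_mesh_coordinates num_squares_x num_squares_y square_size x0 y0 → Spec_generate_mesh_coordinates num_squares_x num_squares_y square_size x0 y0 (generate_mesh_coordinates num_squares_x num_squares_y square_size x0 y0)

-- ===== LEMMAS AND PROOFS =====

-- A as a flatMap over the outer range
lemma meshA_eq_flatMap (nx ny s x0 y0 : Int) :
    generate_mesh_coordinates nx ny s x0 y0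
      = (PySem.List.pyRange 0 ny 1).flatMap (fun i =>
          (PySem.List.pyRange 0 nx 1).map (fun j => (x0 + j * s, y0 + i * s))) := by
  unfold generate_mesh_coordinates
  have h : ∀ (i : Int) (acc : List (Int × Int)),
      (PySem.List.pyRange 0 nx 1).foldl (fun c j => c ++ [(x0 + j * s, y0 + i * s)]) acc
        = acc ++ (PySem.List.pyRange 0 nx 1).map (fun j => (x0 + j * s, y0 + i * s)) := by
    intro i acc
    exact PySem.List.foldl_append_singleton_eq_map _ _ _
  calc (PySem.List.pyRange 0 ny 1).foldl (fun coordinates i =>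
          (PySem.List.pyRange 0 nx 1).foldl (fun c j => c ++ [(x0 + j * s, y0 + i * s)]) coordinates) []
      = (PySem.List.pyRange 0 ny 1).foldl (fun coordinates i =>
          coordinates ++ (PySem.List.pyRange 0 nx 1).map (fun j => (x0 + j * s, y0 + i * s))) [] := by
        apply PySem.List.foldl_congr_mem
        intro acc x _
        exact h x acc
    _ = _ := by
        simpa using PySem.List.foldl_append_eq_flatMap
          (fun i => (PySem.List.pyRange 0 nx 1).map (fun j => (x0 + j * s, y0 + i * s))) _ []

-- the flat indexed pass equals the nested grid, for a positive row width
lemma mesh_key (nx : Int) (hx : 0 < nx) (s x0 y0 : Int) : ∀ n : Nat,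
    (PySem.List.pyRange 0 (nx * (n : Int)) 1).map (fun k =>
        (x0 + PySem.Int.mod k nx * s, y0 + PySem.Int.floordiv k nx * s))
      = (PySem.List.pyRange 0 (n : Int) 1).flatMap (fun i =>
          (PySem.List.pyRange 0 nx 1).map (fun j => (x0 + j * s, y0 + i * s))) := by
  intro n
  induction n with
  | zero => simp [PySem.List.pyRange_one_eq_nil]
  | succ m ih =>
    have h1 : (0:Int) ≤ nx * (m : Int) := by positivity
    have hsplit : PySem.List.pyRange 0 (nx * ((m + 1 : Nat) : Int)) 1
        = PySem.List.pyRange 0 (nx * (m : Int)) 1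
          ++ PySem.List.pyRange (nx * (m : Int)) (nx * (m : Int) + nx) 1 := by
      have : nx * ((m + 1 : Nat) : Int) = nx * (m : Int) + nx := by push_cast; ring
      rw [this]
      exact PySem.List.pyRange_one_append 0 (nx * (m : Int)) (nx * (m : Int) + nx) h1 (by omega)
    have houter : PySem.List.pyRange 0 ((m + 1 : Nat) : Int) 1
        = PySem.List.pyRange 0 (m : Int) 1 ++ [(m : Int)] := by
      have : ((m + 1 : Nat) : Int) = (m : Int) + 1 := by push_cast; ring
      rw [this]
      exact PySem.List.pyRange_one_succ_right (by positivity)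
    rw [hsplit, houter, List.map_append, List.flatMap_append, ih]
    congr 1
    -- the last chunk is row m
    have hchunk : PySem.List.pyRange (nx * (m : Int)) (nx * (m : Int) + nx) 1
        = (PySem.List.pyRange 0 nx 1).map (fun j => nx * (m : Int) + j) := by
      rw [PySem.List.pyRange_one, PySem.List.pyRange_one]
      simp [List.map_map, Function.comp]
    rw [hchunk, List.map_map]
    simp only [List.flatMap_cons, List.flatMap_nil, List.append_nil]
    apply List.map_congr_left
    intro j hj
    have hjb := (PySem.List.mem_pyRange_one).1 hj
    have hmod : PySem.Int.mod (nx * (m : Int) + j) nx = j := by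
      rw [PySem.Int.mod_eq_emod_of_pos hx,
        show nx * (m : Int) + j = j + nx * (m : Int) by ring, Int.add_mul_emod_self_left]
      exact Int.emod_eq_of_lt hjb.1 hjb.2
    have hdiv : PySem.Int.floordiv (nx * (m : Int) + j) nx = (m : Int) := by
      rw [PySem.Int.floordiv_eq_ediv_of_pos hx,
        show nx * (m : Int) + j = j + nx * (m : Int) by ring,
        Int.add_mul_ediv_left _ _ (by omega : nx ≠ 0),
        Int.ediv_eq_zero_of_lt hjb.1 hjb.2]
      ring
    simp [Function.comp, hmod, hdiv]

-- ===== VERDICT (by name: the statement is the Claim_ definition above) =====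
theorem generate_mesh_coordinates_spec : Claim_equal_generate_mesh_coordinates := by
  unfold Claim_equal_generate_mesh_coordinates
  intro nx ny s x0 y0 _
  unfold Spec_generate_mesh_coordinates generate_mesh_coordinates_alt
  rw [meshA_eq_flatMap]
  by_cases hdeg : nx ≤ 0 ∨ ny ≤ 0
  · rw [if_pos hdeg]
    rcases hdeg with h | h
    · refine List.flatMap_eq_nil_iff.2 ?_
      intro i _
      simp [PySem.List.pyRange_one_eq_nil h]
    · simp [PySem.List.pyRange_one_eq_nil h]
  · push Not at hdeg
    rw [if_neg (by push Not; exact hdeg)]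
    obtain ⟨hx, hy⟩ := hdeg
    obtain ⟨n, hn⟩ : ∃ n : Nat, ny = (n : Int) := ⟨ny.toNat, by omega⟩
    subst hn
    exact (mesh_key nx hx s x0 y0 n).symm
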